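-- pv_equiv track=rewrite | github.com/Zaid-Iqbal/RankedChoiceVoting | RankedChoiceVoting.py | getLoser
-- ===== SOURCE A (Python) =====
-- def getLoser(tallies):
--     #records the lowest number of votes a candidate has gotten so far
--     min = len(list(tallies.values())[0])
--
--     #initialize the list that will be returned with all the names of losers
--     losers = [list(tallies.keys())[0]]
--
--     #min and losers initialized with the values of the first candidate and their # of votes just so its not empty
--
--     for x in list(tallies.items())[1:]:
--         #If a new minimum number of votes is found, the losers list is emptied and the new loser candidate is added
--         if len(x[1]) < min:
--             min = len(x[1])
--             losers = [x[0]]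
--         #If someone else with the same number of lowest votes is found, they are also added to the list.
--         elif len(x[1]) == min:
--             losers.append(x[0])
--     return losers
-- ===== SOURCE B (Python) =====
-- def getLoser(tallies):
--     m = min(len(v) for v in tallies.values())
--     return [k for k, v in tallies.items() if len(v) == m]
-- ===== Notes on version B (the rewrite author's own statement) =====
-- stated objective: simpler
-- what changed: Replaces A's single-pass running-minimum with accumulator-reset by a two-pass min-then-filter (compute the minimum vote count, then list the candidates attaining it).
import Mathlib
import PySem

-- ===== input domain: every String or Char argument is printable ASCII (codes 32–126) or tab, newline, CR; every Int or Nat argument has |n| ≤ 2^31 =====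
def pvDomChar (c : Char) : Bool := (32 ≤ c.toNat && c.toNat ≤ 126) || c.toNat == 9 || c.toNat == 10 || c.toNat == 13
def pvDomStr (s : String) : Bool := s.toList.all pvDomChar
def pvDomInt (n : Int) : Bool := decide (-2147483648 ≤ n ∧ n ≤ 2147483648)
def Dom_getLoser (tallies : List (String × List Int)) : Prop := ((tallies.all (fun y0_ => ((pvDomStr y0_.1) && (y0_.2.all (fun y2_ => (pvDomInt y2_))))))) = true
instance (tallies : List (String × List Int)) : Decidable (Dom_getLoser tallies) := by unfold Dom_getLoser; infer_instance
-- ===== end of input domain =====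

-- B replaces A's running-minimum loop by two-pass min-then-filter; both raise on the empty dict (Pre_ excludes it).
-- ===== PORT A =====
def getLoserLoop : List (String × List Int) → Int → List String → List String
  | [], _, losers => losers
  | (k, v) :: rest, m, losers =>
    if (v.length : Int) < m then getLoserLoop rest (v.length : Int) [k]
    else if (v.length : Int) = m then getLoserLoop rest m (losers ++ [k])
    else getLoserLoop rest m losers

def getLoser (tallies : List (String × List Int)) : List String :=
  match tallies with
  | [] => []  -- Python raises IndexError here; excluded by Pre_getLoser
  | (k0, v0) :: rest => getLoserLoop rest (v0.length : Int) [k0]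

-- ===== PORT B =====
def getLoser_alt (tallies : List (String × List Int)) : List String :=
  match (tallies.map (fun p => (p.2.length : Int))).min? with
  | none => []  -- Python raises ValueError here; excluded by Pre_getLoser
  | some m => (tallies.filter (fun p => (p.2.length : Int) = m)).map Prod.fst

-- ===== PRECONDITION & SPEC =====
-- Pre_ excludes only the empty dict, on which A raises IndexError.
def Pre_getLoser (tallies : List (String × List Int)) : Prop := tallies ≠ []
instance (tallies : List (String × List Int)) : Decidable (Pre_getLoser tallies) := by unfold Pre_getLoser; infer_instance
def pvWitness_getLoser : (List (String × List Int)) := [("a", [1, 2]), ("b", [3])]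
def Spec_getLoser (tallies : List (String × List Int)) (out : List String) : Prop := out = getLoser_alt tallies
instance (tallies : List (String × List Int)) (out : List String) : Decidable (Spec_getLoser tallies out) := by unfold Spec_getLoser; infer_instance

-- ===== CLAIM (what is proved, stated in full; the proofs are below) =====
def Claim_equal_getLoser : Prop := ∀ (tallies : List (String × List Int)), Dom_getLoser tallies → Pre_getLoser tallies → Spec_getLoser tallies (getLoser tallies)

-- ===== LEMMAS AND PROOFS =====
theorem foldl_min_le (l : List Int) (m : Int) : l.foldl min m ≤ m := by
  induction l generalizing m with
  | nil => simp
  | cons a t ih => exact le_trans (ih (min m a)) (min_le_left m a)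

theorem loop_spec (rest : List (String × List Int)) (m : Int) (acc : List String) :
    getLoserLoop rest m acc =
      (if (rest.map (fun p => (p.2.length : Int))).foldl min m = m then acc else []) ++
        (rest.filter (fun p => (p.2.length : Int) = (rest.map (fun p => (p.2.length : Int))).foldl min m)).map Prod.fst := by
  induction rest generalizing m acc with
  | nil => simp [getLoserLoop]
  | cons p t ih =>
    obtain ⟨k, v⟩ := p
    have hle : (t.map (fun p => (p.2.length : Int))).foldl min ((v.length : Int)) ≤ (v.length : Int) :=
      foldl_min_le _ _
    by_cases h1 : (v.length : Int) < m
    · have hmin : min m (v.length : Int) = (v.length : Int) := min_eq_right (le_of_lt h1)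
      simp only [getLoserLoop, if_pos h1, ih, List.map_cons, List.foldl_cons, hmin,
        List.filter_cons]
      have hne : (t.map (fun p => (p.2.length : Int))).foldl min ((v.length : Int)) ≠ m :=
        ne_of_lt (lt_of_le_of_lt hle h1)
      rw [if_neg hne]
      by_cases h2 : ((v.length : Int)) = (t.map (fun p => (p.2.length : Int))).foldl min ((v.length : Int))
      · rw [if_pos (le_antisymm hle (le_of_eq h2))]
        simp [← h2]
      · rw [if_neg (fun he => h2 he.symm)]
        simp [decide_eq_false h2]
    · by_cases h2 : (v.length : Int) = m
      · subst h2
        have hmin : min ((v.length : Int)) ((v.length : Int)) = (v.length : Int) := min_self _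
        simp only [getLoserLoop, if_neg h1, ih, List.map_cons, List.foldl_cons, hmin,
          List.filter_cons]
        by_cases h3 : (t.map (fun p => (p.2.length : Int))).foldl min ((v.length : Int)) = (v.length : Int)
        · simp [h3]
        · rw [if_neg h3, if_neg h3]
          have : ¬ ((v.length : Int)) = (t.map (fun p => (p.2.length : Int))).foldl min ((v.length : Int)) :=
            fun he => h3 he.symm
          simp [decide_eq_false this]
      · have hgt : m < (v.length : Int) := lt_of_le_of_ne (not_lt.mp h1) (fun he => h2 he.symm)
        have hmin : min m ((v.length : Int)) = m := min_eq_left (le_of_lt hgt)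
        simp only [getLoserLoop, if_neg h1, if_neg h2, ih, List.map_cons, List.foldl_cons, hmin,
          List.filter_cons]
        have hne : ¬ ((v.length : Int)) = (t.map (fun p => (p.2.length : Int))).foldl min m :=
          fun he => absurd (he ▸ (foldl_min_le _ m)) (not_le.mpr hgt)
        simp [decide_eq_false hne]

-- ===== VERDICT (by name: the statement is the Claim_ definition above) =====
theorem getLoser_spec : Claim_equal_getLoser := by
  intro tallies _ hpre
  unfold Spec_getLoser
  match tallies with
  | [] => exact absurd rfl hpre
  | (k0, v0) :: rest =>
    simp only [getLoser, getLoser_alt, List.map_cons, List.min?_cons', loop_spec,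
      List.filter_cons]
    have hle : (rest.map (fun p => (p.2.length : Int))).foldl min ((v0.length : Int)) ≤ (v0.length : Int) :=
      foldl_min_le _ _
    by_cases h : (rest.map (fun p => (p.2.length : Int))).foldl min ((v0.length : Int)) = (v0.length : Int)
    · rw [if_pos h]
      simp [decide_eq_true h.symm]
    · rw [if_neg h]
      have : ¬ ((v0.length : Int)) = (rest.map (fun p => (p.2.length : Int))).foldl min ((v0.length : Int)) :=
        fun he => h he.symm
      simp [decide_eq_false this]
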